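-- pv_equiv track=rewrite | github.com/kommo124/dotfiles | waybar/scripts/mpris_priority.py | choose_pool
-- ===== SOURCE A (Python) =====
-- def choose_pool(sources):
--     playing = [s for s in sources if s.get("status") == "Playing"]
--     paused = [s for s in sources if s.get("status") == "Paused"]
--
--     if playing:
--         return playing
--     if paused:
--         return paused
--     return sources
-- ===== SOURCE B (Python) =====
-- def choose_pool(sources):
--     def rank(s):
--         st = s.get("status")
--         if st == "Playing":
--             return 0
--         if st == "Paused":
--             return 1
--         return 2
--     best = 2
--     for s in sources:
--         r = rank(s)
--         if r < best:
--             best = r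
--     return [s for s in sources if rank(s) == best]
-- ===== Notes on version B (the rewrite author's own statement) =====
-- stated objective: alternative
-- what changed: Replaces A's two status-specific filters with a three-way return by a priority-rank selection: each source is ranked Playing=0, Paused=1, other=2, the minimum rank present is computed, and the sources achieving that rank are returned (when nothing is Playing/Paused every source has rank 2, so the whole pool is returned).
import Mathlib
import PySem

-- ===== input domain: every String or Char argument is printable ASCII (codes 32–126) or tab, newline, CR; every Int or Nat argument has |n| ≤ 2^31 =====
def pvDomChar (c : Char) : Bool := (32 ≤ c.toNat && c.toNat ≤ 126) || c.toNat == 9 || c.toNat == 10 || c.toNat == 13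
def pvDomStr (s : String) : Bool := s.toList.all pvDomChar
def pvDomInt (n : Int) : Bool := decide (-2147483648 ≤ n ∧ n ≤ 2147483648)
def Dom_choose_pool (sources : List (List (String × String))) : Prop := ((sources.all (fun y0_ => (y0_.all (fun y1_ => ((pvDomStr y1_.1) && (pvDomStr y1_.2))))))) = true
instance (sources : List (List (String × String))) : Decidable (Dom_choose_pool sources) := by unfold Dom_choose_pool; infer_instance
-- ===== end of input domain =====

-- B replaces A's two status filters + three-way return by priority-rank selection (min rank, then keep its achievers);
-- return-value equivalence only: in the fallback A returns the original list object, B a fresh equal list.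

-- ===== PORT A =====
-- s.get("status") on a dict → first-match lookup in the association list (PySem.Dict.get?)
def pvStatus (s : List (String × String)) : Option String :=
  (PySem.Dict.mk s).get? "status"

def choose_pool (sources : List (List (String × String))) : List (List (String × String)) :=
  let playing := sources.filter (fun s => pvStatus s == some "Playing")
  let paused := sources.filter (fun s => pvStatus s == some "Paused")
  if playing ≠ [] then playing
  else if paused ≠ [] then paused
  else sources

-- ===== PORT B =====
-- rank: Playing = 0, Paused = 1, anything else = 2
def pvRank (s : List (String × String)) : Nat :=
  if pvStatus s == some "Playing" then 0
  else if pvStatus s == some "Paused" then 1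
  else 2

def choose_pool_alt (sources : List (List (String × String))) : List (List (String × String)) :=
  let best := sources.foldl (fun m s => if pvRank s < m then pvRank s else m) 2
  sources.filter (fun s => pvRank s == best)

-- ===== PRECONDITION & SPEC =====
def Spec_choose_pool (sources : List (List (String × String))) (out : List (List (String × String))) : Prop := out = choose_pool_alt sources
instance (sources : List (List (String × String))) (out : List (List (String × String))) : Decidable (Spec_choose_pool sources out) := by unfold Spec_choose_pool; infer_instance

-- ===== CLAIM (what is proved, stated in full; the proofs are below) =====
def Claim_equal_choose_pool : Prop := ∀ (sources : List (List (String × String))), Dom_choose_pool sources → Spec_choose_pool sources (choose_pool sources)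

-- ===== LEMMAS AND PROOFS =====
def pvBigMin (l : List (List (String × String))) : Nat :=
  l.foldr (fun s r => min (pvRank s) r) 2

theorem pvFold_eq_min (l : List (List (String × String))) (m : Nat) (hm : m ≤ 2) :
    l.foldl (fun m s => if pvRank s < m then pvRank s else m) m = min m (pvBigMin l) := by
  induction l generalizing m with
  | nil => simp [pvBigMin]; omega
  | cons s t ih =>
    simp only [List.foldl_cons]
    rw [show (if pvRank s < m then pvRank s else m) = min m (pvRank s) from by split <;> omega]
    rw [ih _ (by omega)]
    rw [show pvBigMin (s :: t) = min (pvRank s) (pvBigMin t) from rfl]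
    omega

theorem pvBigMin_eq (l : List (List (String × String))) :
    pvBigMin l =
      if l.any (fun s => pvRank s == 0) then 0
      else if l.any (fun s => pvRank s == 1) then 1 else 2 := by
  induction l with
  | nil => simp [pvBigMin]
  | cons s t ih =>
    rw [show pvBigMin (s :: t) = min (pvRank s) (pvBigMin t) from rfl, ih]
    have hr : pvRank s = 0 ∨ pvRank s = 1 ∨ pvRank s = 2 := by
      unfold pvRank; split
      · exact Or.inl rfl
      · split
        · exact Or.inr (Or.inl rfl)
        · exact Or.inr (Or.inr rfl)
    rcases hr with h | h | h <;> simp [h] <;> split_ifs <;> omega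

theorem pvRank_zero_iff (s : List (String × String)) :
    (pvRank s == 0) = (pvStatus s == some "Playing") := by
  unfold pvRank; split_ifs with h1 h2 <;> simp_all

theorem pvRank_one_iff (s : List (String × String)) :
    (pvRank s == 1) = (pvStatus s == some "Paused") := by
  unfold pvRank; split_ifs with h1 h2 <;> simp_all

-- ===== VERDICT (by name: the statement is the Claim_ definition above) =====
theorem choose_pool_spec : Claim_equal_choose_pool := by
  intro sources _
  show choose_pool sources = choose_pool_alt sources
  simp only [choose_pool, choose_pool_alt]
  rw [pvFold_eq_min _ 2 (le_refl 2), pvBigMin_eq]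
  by_cases h0 : (sources.any fun s => pvRank s == 0) = true
  · rw [if_pos h0]
    rw [List.filter_congr (fun s _ => by
      rw [show min 2 0 = 0 from rfl, pvRank_zero_iff s] :
      ∀ s ∈ sources, (pvRank s == min 2 0) = (pvStatus s == some "Playing"))]
    have hne : sources.filter (fun s => pvStatus s == some "Playing") ≠ [] := by
      obtain ⟨s, hs, hp⟩ := List.any_eq_true.mp h0
      rw [pvRank_zero_iff] at hp
      intro hnil
      have := List.filter_eq_nil_iff.mp hnil s hs
      simp [hp] at this
    rw [if_pos hne]
  · rw [if_neg h0]
    have hp0 : sources.filter (fun s => pvStatus s == some "Playing") = [] := by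
      apply List.filter_eq_nil_iff.mpr
      intro s hs hcon
      exact h0 (List.any_eq_true.mpr ⟨s, hs, by rw [pvRank_zero_iff]; exact hcon⟩)
    by_cases h1 : (sources.any fun s => pvRank s == 1) = true
    · rw [if_pos h1]
      rw [List.filter_congr (fun s _ => by
        rw [show min 2 1 = 1 from rfl, pvRank_one_iff s] :
        ∀ s ∈ sources, (pvRank s == min 2 1) = (pvStatus s == some "Paused"))]
      have hne : sources.filter (fun s => pvStatus s == some "Paused") ≠ [] := by
        obtain ⟨s, hs, hp⟩ := List.any_eq_true.mp h1
        rw [pvRank_one_iff] at hp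
        intro hnil
        have := List.filter_eq_nil_iff.mp hnil s hs
        simp [hp] at this
      rw [if_neg (by simp [hp0]), if_pos hne]
    · rw [if_neg h1]
      have hq0 : sources.filter (fun s => pvStatus s == some "Paused") = [] := by
        apply List.filter_eq_nil_iff.mpr
        intro s hs hcon
        exact h1 (List.any_eq_true.mpr ⟨s, hs, by rw [pvRank_one_iff]; exact hcon⟩)
      rw [if_neg (by simp [hp0]), if_neg (by simp [hq0])]
      symm
      apply List.filter_eq_self.mpr
      intro s hs
      have a0 : ¬ (pvRank s == 0) = true := fun hc => h0 (List.any_eq_true.mpr ⟨s, hs, hc⟩)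
      have a1 : ¬ (pvRank s == 1) = true := fun hc => h1 (List.any_eq_true.mpr ⟨s, hs, hc⟩)
      simp only [beq_iff_eq] at a0 a1 ⊢
      have h2 : pvRank s ≤ 2 := by unfold pvRank; split_ifs <;> omega
      omega
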